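-- pv_equiv track=rewrite | github.com/ZiChuanLan/PDF2PPT-cloud-test | api/scripts/benchmark_engines.py | _group_contiguous_spans
-- ===== SOURCE A (Python) =====
-- def _group_contiguous_spans(page_numbers: list[int]) -> list[tuple[int, int]]:
--     """Group page numbers into contiguous [start,end] spans (1-based)."""
--
--     unique = sorted({int(p) for p in page_numbers if int(p) > 0})
--     if not unique:
--         return []
--
--     spans: list[list[int]] = []
--     for page_no in unique:
--         if not spans or page_no != spans[-1][1] + 1:
--             spans.append([page_no, page_no])
--         else:
--             spans[-1][1] = page_no
--
--     return [(int(a), int(b)) for a, b in spans if a > 0 and b >= a]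
-- ===== SOURCE B (Python) =====
-- def _group_contiguous_spans(page_numbers: list[int]) -> list[tuple[int, int]]:
--     """Group page numbers into contiguous [start,end] spans (1-based)."""
--     pages = {int(p) for p in page_numbers if int(p) > 0}
--     starts = sorted(x for x in pages if x - 1 not in pages)
--     ends = sorted(x for x in pages if x + 1 not in pages)
--     return list(zip(starts, ends))
-- ===== Notes on version B (the rewrite author's own statement) =====
-- stated objective: alternative
-- what changed: Replaces A's sequential run-extension over the sorted unique list (append [p,p] or overwrite the last span's end, then a validity filter) with boundary detection on the positive-page set: a page x starts a span iff x-1 is not in the set and ends one iff x+1 is not, so the answer is zip(sorted(starts), sorted(ends)) with no sequential span state.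
import Mathlib
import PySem

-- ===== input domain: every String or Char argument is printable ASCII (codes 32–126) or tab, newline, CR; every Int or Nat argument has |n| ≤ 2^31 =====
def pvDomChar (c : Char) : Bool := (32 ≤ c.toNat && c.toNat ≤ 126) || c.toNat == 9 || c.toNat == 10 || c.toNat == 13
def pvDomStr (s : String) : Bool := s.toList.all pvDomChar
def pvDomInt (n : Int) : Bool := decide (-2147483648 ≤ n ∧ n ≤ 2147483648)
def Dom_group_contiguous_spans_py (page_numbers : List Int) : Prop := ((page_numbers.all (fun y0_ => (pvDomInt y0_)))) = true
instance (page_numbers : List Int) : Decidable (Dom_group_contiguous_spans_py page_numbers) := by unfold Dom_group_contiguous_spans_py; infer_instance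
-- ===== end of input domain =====

-- B detects span boundaries by set membership (x-1/x+1 not in the set) and zips the sorted
-- start/end lists, instead of A's sequential run-extension with a trailing filter (objective: alternative).


-- ===== PORT A =====
-- one iteration of A's for-loop: append [p,p], or overwrite the last span's end
def pvStepA (spans : List (Int × Int)) (p : Int) : List (Int × Int) :=
  match spans.getLast? with
  | none => spans ++ [(p, p)]
  | some (a, b) =>
      if p ≠ b + 1 then spans ++ [(p, p)]
      else spans.dropLast ++ [(a, p)]

def group_contiguous_spans_py (page_numbers : List Int) : List (Int × Int) :=
  let unique := PySem.List.sorted (PySem.Set.ofList (page_numbers.filter (fun p => decide (0 < p)))) (fun x => x) false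
  if unique = [] then []
  else
    let spans := unique.foldl pvStepA []
    (spans.filter (fun ab => decide (0 < ab.1) && decide (ab.1 ≤ ab.2))).map (fun ab => (ab.1, ab.2))

-- ===== PORT B =====
def group_contiguous_spans_py_alt (page_numbers : List Int) : List (Int × Int) :=
  let pages := PySem.Set.ofList (page_numbers.filter (fun p => decide (0 < p)))
  let starts := PySem.List.sorted (pages.filter (fun x => !decide ((x - 1) ∈ pages))) (fun x => x) false
  let ends := PySem.List.sorted (pages.filter (fun x => !decide ((x + 1) ∈ pages))) (fun x => x) false
  starts.zip ends

-- ===== PRECONDITION & SPEC =====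
def Spec_group_contiguous_spans_py (page_numbers : List Int) (out : List (Int × Int)) : Prop := out = group_contiguous_spans_py_alt page_numbers
instance (page_numbers : List Int) (out : List (Int × Int)) : Decidable (Spec_group_contiguous_spans_py page_numbers out) := by unfold Spec_group_contiguous_spans_py; infer_instance

-- ===== CLAIM (what is proved, stated in full; the proofs are below) =====
def Claim_equal_group_contiguous_spans_py : Prop := ∀ (page_numbers : List Int), Dom_group_contiguous_spans_py page_numbers → Spec_group_contiguous_spans_py page_numbers (group_contiguous_spans_py page_numbers)

-- ===== LEMMAS AND PROOFS =====

-- the maximal consecutive run continuing after x; return (run end, rest)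
def pvSplitRun (x : Int) : List Int → Int × List Int
  | [] => (x, [])
  | y :: t => if y = x + 1 then pvSplitRun y t else (x, y :: t)

theorem pvSplitRun_snd_length (x : Int) (xs : List Int) : (pvSplitRun x xs).2.length ≤ xs.length := by
  induction xs generalizing x with
  | nil => simp [pvSplitRun]
  | cons y t ih =>
      simp only [pvSplitRun]
      split
      · exact Nat.le_trans (ih y) (Nat.le_succ _)
      · simp

-- run-splitting normal form of A's loop
def pvSpansA : List Int → List (Int × Int)
  | [] => []
  | x :: t =>
      let r := pvSplitRun x t
      (x, r.1) :: pvSpansA r.2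
termination_by xs => xs.length
decreasing_by
  simpa using Nat.lt_succ_of_le (pvSplitRun_snd_length x t)

-- A's loop, once a last span (a,b) exists, only touches the tail: peel the accumulator
def pvRun (a b : Int) : List Int → List (Int × Int)
  | [] => [(a, b)]
  | x :: t => if x = b + 1 then pvRun a x t else (a, b) :: pvRun x x t

theorem foldl_stepA_acc (xs : List Int) (acc : List (Int × Int)) (a b : Int) :
    xs.foldl pvStepA (acc ++ [(a, b)]) = acc ++ pvRun a b xs := by
  induction xs generalizing acc a b with
  | nil => simp [pvRun]
  | cons x t ih =>
      have hstep : pvStepA (acc ++ [(a, b)]) x =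
          if x = b + 1 then acc ++ [(a, x)] else (acc ++ [(a, b)]) ++ [(x, x)] := by
        by_cases h : x = b + 1
        · simp [pvStepA, h]
        · simp [pvStepA, h]
      rw [List.foldl_cons, hstep]
      by_cases h : x = b + 1
      · rw [if_pos h, ih acc a x, pvRun, if_pos h]
      · rw [if_neg h, ih (acc ++ [(a, b)]) x x, pvRun, if_neg h]
        simp

theorem pvRun_eq_splitRun (a b : Int) (xs : List Int) :
    pvRun a b xs = (a, (pvSplitRun b xs).1) :: pvSpansA (pvSplitRun b xs).2 := by
  induction xs generalizing a b with
  | nil => simp [pvRun, pvSplitRun, pvSpansA]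
  | cons x t ih =>
      simp only [pvRun, pvSplitRun]
      by_cases h : x = b + 1
      · simp only [if_pos h, ih]
      · simp only [if_neg h, pvSpansA]
        rw [ih x x]

theorem foldl_stepA_eq_spansA (xs : List Int) : xs.foldl pvStepA [] = pvSpansA xs := by
  cases xs with
  | nil => simp [pvSpansA]
  | cons x t =>
      have h0 : pvStepA [] x = ([] : List (Int × Int)) ++ [(x, x)] := by simp [pvStepA]
      rw [List.foldl_cons, h0, foldl_stepA_acc, pvRun_eq_splitRun]
      simp [pvSpansA]

theorem pvSplitRun_snd_subset (x : Int) (xs : List Int) : (pvSplitRun x xs).2 ⊆ xs := by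
  induction xs generalizing x with
  | nil => simp [pvSplitRun]
  | cons y t ih =>
      simp only [pvSplitRun]
      split
      · exact List.Subset.trans (ih y) (List.subset_cons_self _ _)
      · exact List.Subset.refl _

theorem pvSplitRun_fst_ge (x : Int) (xs : List Int) : x ≤ (pvSplitRun x xs).1 := by
  induction xs generalizing x with
  | nil => simp [pvSplitRun]
  | cons y t ih =>
      simp only [pvSplitRun]
      split
      · next h => exact le_trans (by omega) (ih y)
      · simp

theorem mem_pvSpansA (xs : List Int) :
    ∀ p ∈ pvSpansA xs, p.1 ∈ xs ∧ p.1 ≤ p.2 := by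
  induction xs using pvSpansA.induct with
  | case1 => simp [pvSpansA]
  | case2 x t r ih =>
      intro p hp
      rw [pvSpansA] at hp
      simp only [List.mem_cons] at hp
      rcases hp with h | h
      · subst h
        exact ⟨List.mem_cons_self, pvSplitRun_fst_ge x t⟩
      · rcases ih p h with ⟨h1, h2⟩
        exact ⟨List.mem_cons_of_mem _ (pvSplitRun_snd_subset x t h1), h2⟩

-- decomposition of pvSplitRun over a strictly-increasing tail: the consumed part c is exactly
-- the interval (x, r], and everything remaining lies above r + 1
theorem pvSplitRun_decomp (x : Int) (t : List Int)
    (ht : t.Pairwise (· < ·)) (hx : ∀ y ∈ t, x < y) :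
    ∃ c : List Int,
      t = c ++ (pvSplitRun x t).2 ∧
      x ≤ (pvSplitRun x t).1 ∧
      (∀ z ∈ c, x < z ∧ z ≤ (pvSplitRun x t).1) ∧
      (∀ y ∈ (pvSplitRun x t).2, (pvSplitRun x t).1 + 1 < y) ∧
      (∀ z : Int, x ≤ z → z ≤ (pvSplitRun x t).1 → z ∈ x :: c) := by
  induction t generalizing x with
  | nil =>
      refine ⟨[], by simp [pvSplitRun], le_refl _, by simp, by simp [pvSplitRun], ?_⟩
      intro z h1 h2
      simp [pvSplitRun] at h2 ⊢
      omega
  | cons y t' ih =>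
      by_cases h : y = x + 1
      · have ht' : t'.Pairwise (· < ·) := (List.pairwise_cons.1 ht).2
        have hy' : ∀ z ∈ t', y < z := (List.pairwise_cons.1 ht).1
        obtain ⟨c, hc1, hc2, hc3, hc4, hc5⟩ := ih y ht' hy'
        have hsplit : pvSplitRun x (y :: t') = pvSplitRun y t' := by
          simp [pvSplitRun, h]
        refine ⟨y :: c, ?_, ?_, ?_, ?_, ?_⟩
        · rw [hsplit]; simpa using hc1
        · rw [hsplit]; omega
        · rw [hsplit]
          intro z hz
          rcases List.mem_cons.1 hz with hz | hz
          · subst hz; exact ⟨by omega, by omega⟩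
          · rcases hc3 z hz with ⟨h1, h2⟩; exact ⟨by omega, h2⟩
        · rw [hsplit]; exact hc4
        · rw [hsplit]
          intro z h1 h2
          by_cases hzx : z = x
          · simp [hzx]
          · have : y ≤ z := by omega
            have := hc5 z this h2
            rcases List.mem_cons.1 this with h' | h'
            · simp [h']
            · simp [h']
      · have hsplit : pvSplitRun x (y :: t') = (x, y :: t') := by
          simp [pvSplitRun, h]
        refine ⟨[], by simp [hsplit], by simp [hsplit], by simp, ?_, ?_⟩
        · rw [hsplit]
          intro z hz
          rcases List.mem_cons.1 hz with hz | hz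
          · have := hx y List.mem_cons_self; omega
          · have := hx y List.mem_cons_self
            have hlt := (List.pairwise_cons.1 ht).1 z hz
            omega
        · rw [hsplit]
          intro z h1 h2
          simp only [List.mem_cons]
          left; omega

-- the main characterisation: on a strictly increasing list, A's run splitting is the zip of
-- span starts (z-1 absent) with span ends (z+1 absent)
theorem pvSpansA_eq_zip (u : List Int) (hu : u.Pairwise (· < ·)) :
    pvSpansA u = (u.filter (fun z => !decide ((z - 1) ∈ u))).zip
                 (u.filter (fun z => !decide ((z + 1) ∈ u))) := by
  induction u using pvSpansA.induct with
  | case1 => simp [pvSpansA]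
  | case2 x t r ih =>
      have ht : t.Pairwise (· < ·) := (List.pairwise_cons.1 hu).2
      have hx : ∀ y ∈ t, x < y := (List.pairwise_cons.1 hu).1
      obtain ⟨c, hc1, hc2, hc3, hc4, hc5⟩ := pvSplitRun_decomp x t ht hx
      set rEnd := (pvSplitRun x t).1 with hr1
      set rest := (pvSplitRun x t).2 with hr2
      have hmem : ∀ z : Int, z ∈ x :: t ↔ (z ∈ x :: c ∨ z ∈ rest) := by
        intro z
        rw [hc1]
        simp [List.mem_append, List.mem_cons, or_assoc]
      have hub : ∀ z ∈ x :: c, x ≤ z ∧ z ≤ rEnd := by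
        intro z hz
        rcases List.mem_cons.1 hz with hz | hz
        · subst hz; exact ⟨le_refl _, hc2⟩
        · rcases hc3 z hz with ⟨h1, h2⟩; exact ⟨by omega, h2⟩
      have hrest : rest.Pairwise (· < ·) := by
        rw [hc1] at ht; exact (List.pairwise_append.1 ht).2.1
      -- start filter on the consumed prefix is [x]
      have hS : (x :: c).filter (fun z => !decide ((z - 1) ∈ x :: t)) = [x] := by
        have hxkeep : (!decide ((x - 1) ∈ x :: t)) = true := by
          simp only [Bool.not_eq_true', decide_eq_false_iff_not]
          intro hmem'
          rcases List.mem_cons.1 hmem' with h | h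
          · omega
          · have := hx _ h; omega
        have hcdrop : ∀ z ∈ c, (!decide ((z - 1) ∈ x :: t)) = false := by
          intro z hz
          rcases hc3 z hz with ⟨h1, h2⟩
          have : z - 1 ∈ x :: c := hc5 (z - 1) (by omega) (by omega)
          simp only [Bool.not_eq_false', decide_eq_true_iff]
          exact (hmem (z - 1)).2 (Or.inl this)
        rw [List.filter_cons, hxkeep]
        simp only [if_true]
        rw [List.filter_eq_nil_iff.2 (by intro z hz; rw [hcdrop z hz]; simp)]
      -- end filter on the consumed prefix is [rEnd]
      have hE : (x :: c).filter (fun z => !decide ((z + 1) ∈ x :: t)) = [rEnd] := by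
        have hkeep : ∀ z ∈ x :: c, (fun z => !decide ((z + 1) ∈ x :: t)) z = decide (z = rEnd) := by
          intro z hz
          rcases hub z hz with ⟨h1, h2⟩
          by_cases hzr : z = rEnd
          · have hnotin : rEnd + 1 ∉ x :: t := by
              intro hmem'
              rcases (hmem (rEnd + 1)).1 hmem' with h | h
              · rcases hub _ h with ⟨_, _⟩; omega
              · have := hc4 _ h; omega
            simp [hzr, hnotin]
          · have : z + 1 ∈ x :: c := hc5 (z + 1) (by omega) (by omega)
            have hm : z + 1 ∈ x :: t := (hmem (z + 1)).2 (Or.inl this)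
            simp [hm, hzr]
        rw [List.filter_congr hkeep]
        have hnodup : (x :: c).Nodup := by
          have : (x :: c).Pairwise (· < ·) := by
            rw [hc1, ← List.cons_append] at hu
            exact (List.pairwise_append.1 hu).1
          exact this.imp (fun h => by omega)
        have hrmem : rEnd ∈ x :: c := hc5 rEnd hc2 (le_refl _)
        have hcount : (x :: c).count rEnd = 1 := List.count_eq_one_of_mem hnodup hrmem
        rw [show (fun z => decide (z = rEnd)) = (fun z => z == rEnd) from funext fun z => (Bool.beq_eq_decide_eq z rEnd).symm]
        rw [List.filter_beq rEnd, hcount, List.replicate_one]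
      -- membership in the whole list and in rest agree above rEnd + 1
      have hSrest : rest.filter (fun z => !decide ((z - 1) ∈ x :: t)) =
          rest.filter (fun z => !decide ((z - 1) ∈ rest)) := by
        apply List.filter_congr
        intro z hz
        have hz' := hc4 z hz
        have : (z - 1 ∈ x :: t) ↔ (z - 1 ∈ rest) := by
          rw [hmem]
          constructor
          · rintro (h | h)
            · rcases hub _ h with ⟨_, _⟩; omega
            · exact h
          · exact Or.inr
        simp [this]
      have hErest : rest.filter (fun z => !decide ((z + 1) ∈ x :: t)) =
          rest.filter (fun z => !decide ((z + 1) ∈ rest)) := by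
        apply List.filter_congr
        intro z hz
        have hz' := hc4 z hz
        have : (z + 1 ∈ x :: t) ↔ (z + 1 ∈ rest) := by
          rw [hmem]
          constructor
          · rintro (h | h)
            · rcases hub _ h with ⟨_, _⟩; omega
            · exact h
          · exact Or.inr
        simp [this]
      have hfullS : (x :: t).filter (fun z => !decide ((z - 1) ∈ x :: t)) =
          x :: rest.filter (fun z => !decide ((z - 1) ∈ rest)) := by
        rw [show x :: t = (x :: c) ++ rest by rw [hc1]; simp, List.filter_append]
        rw [show ((x :: c) ++ rest : List Int) = x :: t by rw [hc1]; simp] 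
        rw [hS, hSrest]
        simp
      have hfullE : (x :: t).filter (fun z => !decide ((z + 1) ∈ x :: t)) =
          rEnd :: rest.filter (fun z => !decide ((z + 1) ∈ rest)) := by
        rw [show x :: t = (x :: c) ++ rest by rw [hc1]; simp, List.filter_append]
        rw [show ((x :: c) ++ rest : List Int) = x :: t by rw [hc1]; simp]
        rw [hE, hErest]
        simp
      rw [pvSpansA, hfullS, hfullE]
      simp only [List.zip_cons_cons]
      rw [ih hrest]

-- ===== VERDICT (by name: the statement is the Claim_ definition above) =====
theorem group_contiguous_spans_py_spec : Claim_equal_group_contiguous_spans_py := by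
  intro page_numbers _
  unfold Spec_group_contiguous_spans_py group_contiguous_spans_py group_contiguous_spans_py_alt
  set s := PySem.Set.ofList (page_numbers.filter (fun p => decide (0 < p))) with hs
  set u := PySem.List.sorted s (fun x => x) false with hu
  have hulti : u.Pairwise (· < ·) := PySem.List.sorted_ofList_pairwise_lt _
  have huperm : u.Perm s := PySem.List.sorted_perm _ _ _
  have hmem : ∀ z : Int, z ∈ s ↔ z ∈ u := fun z => (huperm.mem_iff).symm
  -- B's two sorted filters are the filters of u
  have hstart : PySem.List.sorted (s.filter (fun x => !decide ((x - 1) ∈ s))) (fun x => x) false =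
      u.filter (fun z => !decide ((z - 1) ∈ u)) := by
    apply PySem.List.sorted_eq_of_perm_of_pairwise_lt
    · have h1 : (u.filter (fun z => !decide ((z - 1) ∈ u))).Perm
          (s.filter (fun z => !decide ((z - 1) ∈ u))) := huperm.filter _
      have h2 : (s.filter (fun z => !decide ((z - 1) ∈ u))) =
          (s.filter (fun x => !decide ((x - 1) ∈ s))) := by
        apply List.filter_congr; intro z _; simp [hmem (z - 1)]
      rw [h2] at h1; exact h1
    · exact hulti.filter _
  have hend : PySem.List.sorted (s.filter (fun x => !decide ((x + 1) ∈ s))) (fun x => x) false =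
      u.filter (fun z => !decide ((z + 1) ∈ u)) := by
    apply PySem.List.sorted_eq_of_perm_of_pairwise_lt
    · have h1 : (u.filter (fun z => !decide ((z + 1) ∈ u))).Perm
          (s.filter (fun z => !decide ((z + 1) ∈ u))) := huperm.filter _
      have h2 : (s.filter (fun z => !decide ((z + 1) ∈ u))) =
          (s.filter (fun x => !decide ((x + 1) ∈ s))) := by
        apply List.filter_congr; intro z _; simp [hmem (z + 1)]
      rw [h2] at h1; exact h1
    · exact hulti.filter _
  show (if u = [] then [] else
      ((u.foldl pvStepA []).filter (fun ab => decide (0 < ab.1) && decide (ab.1 ≤ ab.2))).map (fun ab => (ab.1, ab.2))) =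
      (PySem.List.sorted (s.filter (fun x => !decide ((x - 1) ∈ s))) (fun x => x) false).zip
      (PySem.List.sorted (s.filter (fun x => !decide ((x + 1) ∈ s))) (fun x => x) false)
  rw [hstart, hend]
  by_cases hnil : u = []
  · simp [hnil]
  · have hpos : ∀ x ∈ u, 0 < x := by
      intro x hx
      have : x ∈ s := (hmem x).2 hx
      have : x ∈ page_numbers.filter (fun p => decide (0 < p)) := by
        simpa [hs, PySem.Set.mem_ofList] using this
      simpa using (List.mem_filter.1 this).2
    simp only [if_neg hnil]
    have hall : ∀ p ∈ pvSpansA u, (decide (0 < p.1) && decide (p.1 ≤ p.2)) = true := by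
      intro p hp
      rcases mem_pvSpansA u p hp with ⟨h1, h2⟩
      simp [hpos p.1 h1, h2]
    rw [foldl_stepA_eq_spansA, List.filter_eq_self.2 hall]
    rw [pvSpansA_eq_zip u hulti]
    simp
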